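-- pv_equiv track=rewrite | github.com/maksshokin/5sprint | instruction.py | number_of_times
-- ===== SOURCE A (Python) =====
-- def number_of_times(phrase: str)-> int:
--     """Возвращает целое число"""
--     times: str = ''
--     times_check = True
--     for symbol in phrase:
--         if times_check:
--             try:
--                 times += str(int(symbol))
--             except ValueError:
--                 if symbol == '[':
--                     times_check = False
--                 pass
--     if len(times) > 0:
--         return int(times)
--     else:
--         return 1
-- ===== SOURCE B (Python) =====
-- def number_of_times(phrase: str) -> int:
--     ds = []
--     for c in reversed(phrase):
--         if c == '[':
--             ds.clear()
--         elif '0' <= c <= '9':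
--             ds.append(c)
--     ds.reverse()
--     return int(''.join(ds)) if ds else 1
-- ===== Notes on version B (the rewrite author's own statement) =====
-- stated objective: alternative
-- what changed: B traverses the string back-to-front, pushing digits onto a stack and clearing the stack at every '[' so that only the digits before the first '[' survive, then reverses the stack and calls int() once; this replaces A's forward single pass gated by a times_check flag with per-character try/except int() calls, avoiding exception handling and per-character string building.
import Mathlib
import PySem

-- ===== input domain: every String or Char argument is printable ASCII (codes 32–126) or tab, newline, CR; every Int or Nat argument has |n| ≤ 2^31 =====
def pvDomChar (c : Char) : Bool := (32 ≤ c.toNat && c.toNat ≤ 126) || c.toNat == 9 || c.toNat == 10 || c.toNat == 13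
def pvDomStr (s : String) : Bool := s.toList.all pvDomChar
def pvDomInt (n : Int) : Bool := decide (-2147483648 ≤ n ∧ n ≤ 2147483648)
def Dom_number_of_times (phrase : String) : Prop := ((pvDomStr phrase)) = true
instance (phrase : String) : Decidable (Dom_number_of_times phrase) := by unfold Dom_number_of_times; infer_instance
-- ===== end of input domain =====

-- B scans the string back-to-front, clearing its digit stack at every '[' (no flag, no try/except), then ints once; return values proved equal on the ASCII domain.

-- ===== PORT A =====
-- loop body of A: on the ASCII domain `times += str(int(symbol))` succeeds exactly when
-- symbol is '0'..'9' (= Char.isDigit) and then appends symbol itself; ValueError otherwise.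
def pvAStep (st : List Char × Bool) (symbol : Char) : List Char × Bool :=
  if st.2 then
    if symbol.isDigit then (st.1 ++ [symbol], st.2)
    else if symbol = '[' then (st.1, false)
    else st
  else st

def number_of_times (phrase : String) : Int :=
  let st := phrase.toList.foldl pvAStep ([], true)
  if st.1.length > 0 then (PySem.Int.ofChars? st.1).getD 0 else 1
  -- int(times) cannot raise here (times is a nonempty digit string), so getD 0 is exact

-- ===== PORT B =====
-- loop body of B: clear the stack at '[', push c when '0' <= c <= '9' (= Char.isDigit), else keep it
def pvBStep (ds : List Char) (c : Char) : List Char :=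
  if c = '[' then []
  else if c.isDigit then ds ++ [c]
  else ds

def number_of_times_alt (phrase : String) : Int :=
  let ds := (phrase.toList.reverse.foldl pvBStep []).reverse
  if ds.isEmpty then 1 else (PySem.Int.ofChars? ds).getD 0
  -- int(''.join(ds)) cannot raise here (ds is a nonempty digit string), so getD 0 is exact

-- ===== PRECONDITION & SPEC =====
def Spec_number_of_times (phrase : String) (out : Int) : Prop := out = number_of_times_alt phrase
instance (phrase : String) (out : Int) : Decidable (Spec_number_of_times phrase out) := by unfold Spec_number_of_times; infer_instance

-- ===== CLAIM (what is proved, stated in full; the proofs are below) =====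
def Claim_equal_number_of_times : Prop := ∀ (phrase : String), Dom_number_of_times phrase → Spec_number_of_times phrase (number_of_times phrase)

-- ===== LEMMAS AND PROOFS =====

theorem pvAStep_false (l : List Char) (acc : List Char) :
    List.foldl pvAStep (acc, false) l = (acc, false) := by
  induction l generalizing acc with
  | nil => rfl
  | cons c t ih => simpa [pvAStep] using ih acc

-- A's pass collects exactly the digits before the first '['
theorem pvAStep_true (l : List Char) (acc : List Char) :
    (List.foldl pvAStep (acc, true) l).1
      = acc ++ (l.takeWhile (· ≠ '[')).filter Char.isDigit := by
  induction l generalizing acc with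
  | nil => simp
  | cons c t ih =>
    by_cases hd : c.isDigit
    · have hne : c ≠ '[' := by
        intro h; subst h; simp [Char.isDigit] at hd
      simp [pvAStep, hd, hne, ih]
    · by_cases hb : c = '['
      · subst hb
        simp [pvAStep, hd, pvAStep_false]
      · simp [pvAStep, hd, hb, ih]

-- B's backward pass leaves exactly those digits, in reverse order
theorem pvBStep_reverse (l : List Char) :
    List.foldl pvBStep [] l.reverse
      = ((l.takeWhile (· ≠ '[')).filter Char.isDigit).reverse := by
  induction l with
  | nil => rfl
  | cons c t ih =>
    rw [List.reverse_cons, List.foldl_append, ih]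
    by_cases hb : c = '['
    · subst hb; simp [pvBStep]
    · by_cases hd : c.isDigit <;> simp [pvBStep, hb, hd]

-- ===== VERDICT (by name: the statement is the Claim_ definition above) =====
theorem number_of_times_spec : Claim_equal_number_of_times := by
  intro phrase _
  unfold Spec_number_of_times number_of_times number_of_times_alt
  simp only [pvAStep_true, pvBStep_reverse, List.reverse_reverse, List.nil_append]
  rcases h : (phrase.toList.takeWhile (· ≠ '[')).filter Char.isDigit with _ | ⟨c, t⟩ <;> simp
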